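-- pv_equiv track=rewrite | github.com/malvidin/assemblyline-service-yara | yara_/yara_.py | _is_wide_char
-- ===== SOURCE A (Python) =====
-- def _is_wide_char(string):
--     """
--     Determine if string is a wide-character string.
--
--     Args:
--         string: Potential wide-character string.
--
--     Returns:
--         True if wide character, or False.
--     """
--     if len(string) >= 2 and len(string) % 2 == 0:
--         is_wide_char = True
--         for (i, c) in enumerate(string):
--             if ((i % 2 == 0 and c == 0) or
--                     (i % 2 == 1 and c != 0)):
--                 is_wide_char = False
--                 break
--     else:
--         is_wide_char = False
--
--     return is_wide_char
-- ===== SOURCE B (Python) =====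
-- def _is_wide_char(string):
--     """Wide-char check: the positions holding zero must be exactly the odd indices 1, 3, ..., n-1."""
--     n = len(string)
--     if n < 2 or n % 2:
--         return False
--     zero_positions = [i for i, c in enumerate(string) if c == 0]
--     return zero_positions == [2 * k + 1 for k in range(n // 2)]
-- ===== Notes on version B (the rewrite author's own statement) =====
-- stated objective: alternative
-- what changed: Instead of A's single short-circuiting scan with an index-parity test and a break flag, B collects the list of indices holding zero and compares it against the expected sequence of odd indices [1,3,...,n-1]; no per-element parity test or early exit remains.
import Mathlib
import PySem

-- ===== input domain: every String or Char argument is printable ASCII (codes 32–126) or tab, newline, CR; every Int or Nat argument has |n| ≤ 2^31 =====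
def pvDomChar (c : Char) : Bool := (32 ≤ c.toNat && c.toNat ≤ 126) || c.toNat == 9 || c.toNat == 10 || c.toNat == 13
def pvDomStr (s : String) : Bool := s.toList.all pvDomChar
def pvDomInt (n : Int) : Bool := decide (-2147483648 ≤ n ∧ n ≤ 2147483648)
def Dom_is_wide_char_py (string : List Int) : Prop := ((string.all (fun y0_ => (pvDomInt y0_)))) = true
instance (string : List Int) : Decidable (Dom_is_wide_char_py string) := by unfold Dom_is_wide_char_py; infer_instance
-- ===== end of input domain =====

-- B replaces A's short-circuiting parity scan (enumerate loop with a break flag) by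
-- collecting the zero positions and comparing them with the odd-index sequence; same O(n).


-- ===== PORT A =====
-- the 'for (i, c) in enumerate(string)' loop with its break: recursion carrying the index i,
-- returning the final value of the is_wide_char flag
def is_wide_char_py_loop : List Int → Nat → Bool
  | [], _ => true
  | c :: rest, i =>
    if (i % 2 == 0 && c == 0) || (i % 2 == 1 && c != 0) then false
    else is_wide_char_py_loop rest (i + 1)

def is_wide_char_py (string : List Int) : Bool :=
  if string.length ≥ 2 && string.length % 2 == 0 then
    is_wide_char_py_loop string 0
  else
    false

-- ===== PORT B =====
-- guard, then '[i for i, c in enumerate(string) if c == 0] == [2*k+1 for k in range(n//2)]'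
def is_wide_char_py_alt (string : List Int) : Bool :=
  let n : Int := string.length
  if n < 2 || PySem.Int.mod n 2 != 0 then false
  else
    ((PySem.List.enumerate string).filter (fun p => p.2 == 0)).map (fun p => p.1)
      == (PySem.List.pyRange 0 (PySem.Int.floordiv n 2) 1).map (fun k => 2 * k + 1)

-- ===== PRECONDITION & SPEC =====
def Spec_is_wide_char_py (string : List Int) (out : Bool) : Prop := out = is_wide_char_py_alt string
instance (string : List Int) (out : Bool) : Decidable (Spec_is_wide_char_py string out) := by unfold Spec_is_wide_char_py; infer_instance

-- ===== CLAIM (what is proved, stated in full; the proofs are below) =====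
def Claim_equal_is_wide_char_py : Prop := ∀ (string : List Int), Dom_is_wide_char_py string → Spec_is_wide_char_py string (is_wide_char_py string)

-- ===== LEMMAS AND PROOFS =====

-- proof-layer characterisation: consecutive (lo, hi) pairs must be (non-zero, zero)
def pairsOk : List Int → Bool
  | lo :: hi :: rest => lo != 0 && hi == 0 && pairsOk rest
  | _ => true

-- A's loop only looks at the index modulo 2
theorem loop_add_two (s : List Int) : ∀ i, is_wide_char_py_loop s (i + 2) = is_wide_char_py_loop s i := by
  induction s with
  | nil => intro i; rfl
  | cons c rest ih =>
    intro i
    simp only [is_wide_char_py_loop, Nat.add_mod_right]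
    rw [show i + 2 + 1 = (i + 1) + 2 by omega, ih]

-- on even-length lists A's loop from index 0 agrees with the pair characterisation
theorem loop_eq_pairs : ∀ s : List Int, s.length % 2 = 0 →
    is_wide_char_py_loop s 0 = pairsOk s := by
  intro s
  induction s using pairsOk.induct with
  | case1 lo hi rest ih =>
    intro h
    simp only [List.length_cons] at h
    simp only [is_wide_char_py_loop, pairsOk]
    rw [show (0 : Nat) + 1 + 1 = 0 + 2 by rfl, loop_add_two]
    rw [ih (by omega)]
    by_cases h0 : lo = 0 <;> by_cases h1 : hi = 0 <;> simp [h0, h1]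
  | case2 s hs =>
    intro h
    cases s with
    | nil => rfl
    | cons a t =>
      cases t with
      | nil => simp at h
      | cons b u => exact absurd rfl (hs a b u)

-- zero positions of s when enumeration starts at i
def zp (s : List Int) (i : Int) : List Int :=
  ((PySem.List.enumerate s i).filter (fun p => p.2 == 0)).map (fun p => p.1)

-- the expected odd offsets i+1, i+3, …, i+2m-1
def odds : Int → Nat → List Int
  | _, 0 => []
  | i, m + 1 => (i + 1) :: odds (i + 2) m

theorem mem_zp_ge {s : List Int} {i x : Int} (h : x ∈ zp s i) : i ≤ x := by
  unfold zp at h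
  simp only [List.mem_map, List.mem_filter] at h
  obtain ⟨p, ⟨hp, _⟩, hx⟩ := h
  rw [PySem.List.mem_enumerate_iff] at hp
  obtain ⟨k, _, rfl⟩ := hp
  simp at hx
  omega

theorem zp_cons_cons (lo hi : Int) (rest : List Int) (i : Int) :
    zp (lo :: hi :: rest) i =
      (if lo = 0 then [i] else []) ++ (if hi = 0 then [i + 1] else []) ++ zp rest (i + 2) := by
  unfold zp
  rw [PySem.List.enumerate_cons, PySem.List.enumerate_cons]
  by_cases h0 : lo = 0 <;> by_cases h1 : hi = 0 <;>
    simp [h0, h1, add_assoc]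

theorem key : ∀ s : List Int, s.length % 2 = 0 → ∀ i : Int,
    (zp s i = odds i (s.length / 2)) ↔ pairsOk s = true := by
  intro s
  induction s using pairsOk.induct with
  | case1 lo hi rest ih =>
    intro h i
    simp only [List.length_cons] at h ⊢
    have hlen : (rest.length + 1 + 1) / 2 = rest.length / 2 + 1 := by omega
    rw [hlen, zp_cons_cons]
    simp only [odds, pairsOk]
    by_cases h0 : lo = 0
    · -- first position holds a zero: the lists disagree at the head, both sides false
      have hne : ¬ ((if lo = 0 then [i] else []) ++ (if hi = 0 then [i + 1] else [])
            ++ zp rest (i + 2) = (i + 1) :: odds (i + 2) (rest.length / 2)) := by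
        rw [if_pos h0]
        intro he
        simp only [List.cons_append, List.nil_append, List.cons_eq_cons] at he
        omega
      simp [h0]
    · by_cases h1 : hi = 0
      · -- heads agree; recurse on the tail
        rw [if_neg h0, if_pos h1]
        simp only [List.nil_append, List.singleton_append, List.cons_eq_cons]
        simp [h0, h1, ih (by omega) (i + 2)]
      · -- no zero among the first two: zp rest starts at ≥ i+2, cannot produce i+1
        rw [if_neg h0, if_neg h1]
        simp only [List.nil_append]
        have hne : ¬ (zp rest (i + 2) = (i + 1) :: odds (i + 2) (rest.length / 2)) := by
          intro he
          have hmem : (i + 1) ∈ zp rest (i + 2) := by rw [he]; exact List.mem_cons_self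
          have := mem_zp_ge hmem
          omega
        simp [hne, h1]
  | case2 s hs =>
    intro h i
    cases s with
    | nil => simp [zp, PySem.List.enumerate, odds, pairsOk]
    | cons a t =>
      cases t with
      | nil => simp at h
      | cons b u => exact absurd rfl (hs a b u)

theorem odds_eq_map : ∀ (m : Nat) (i : Int),
    odds i m = (List.range m).map (fun k : Nat => i + 1 + 2 * (k : Int)) := by
  intro m
  induction m with
  | zero => intro i; rfl
  | succ m ih =>
    intro i
    rw [List.range_succ_eq_map]
    simp only [odds, List.map_cons, List.map_map, ih]
    rw [List.cons_eq_cons]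
    constructor
    · norm_num
    · apply List.map_congr_left
      intro k _
      simp only [Function.comp]
      push_cast; ring

-- ===== VERDICT (by name: the statement is the Claim_ definition above) =====
theorem is_wide_char_py_spec : Claim_equal_is_wide_char_py := by
  intro s _
  unfold Spec_is_wide_char_py is_wide_char_py is_wide_char_py_alt
  by_cases hlen : 2 ≤ s.length ∧ s.length % 2 = 0
  · rw [if_pos (by simp [hlen.1, hlen.2]),
        if_neg (by simp; omega)]
    rw [loop_eq_pairs s hlen.2]
    have hdiv : PySem.Int.floordiv (s.length : Int) 2 = ((s.length / 2 : Nat) : Int) := by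
      rw [PySem.Int.floordiv_eq_ediv_of_pos (by omega)]; omega
    have hpat : (PySem.List.pyRange 0 (PySem.Int.floordiv (s.length : Int) 2) 1).map
          (fun k => 2 * k + 1) = odds 0 (s.length / 2) := by
      rw [hdiv, PySem.List.pyRange_one, odds_eq_map]
      simp only [List.map_map, Int.toNat_natCast, Int.sub_zero]
      apply List.map_congr_left
      intro k _
      simp only [Function.comp]
      ring
    rw [hpat]
    have := key s hlen.2 0
    cases hp : pairsOk s
    · simp only [hp] at this
      simpa using this
    · simp only [hp, iff_true] at this
      simpa using this
  · rw [if_neg (by simp; omega), if_pos (by simp; omega)]
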